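-- pv_equiv track=rewrite | github.com/Cr4ftingMine/AdventOfCode | 2025/Day04/Day04_2.py | repeat_until_no_moves
-- ===== SOURCE A (Python) =====
-- positions = [(-1, -1), (-1, 0), (-1, 1),
--              (0, -1),           (0, 1),
--              (1, -1),  (1, 0),  (1, 1)]
--
-- def process_lines(grid):
--     movable_count = 0
--     for i in range(len(grid)):
--         for j in range(len(grid[i])):
--             if grid[i][j] == "@":
--                 count = 0
--                 for pos in positions:
--                     n_i, n_j = i + pos[0], j + pos[1]
--                     if 0 <= n_i < len(grid) and 0 <= n_j < len(grid[i]):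
--                         if grid[n_i][n_j] == "@":
--                             count += 1
--                 if count < 4:
--                     movable_count += 1
--                     grid[i][j] = "."  # Remove the moved roll
--     return movable_count
--
-- def repeat_until_no_moves(grid):
--     total_moved = 0
--     while True:
--         moved = process_lines(grid)
--         if moved == 0:
--             break
--         total_moved += moved
--     return total_moved
-- ===== SOURCE B (Python) =====
-- # B: synchronous set-based erosion to the greatest fixpoint ("4-core") instead of
-- # A's repeated sequential in-place passes; note A mutates grid in place, B does not
-- # (equivalence claimed for the return value only).
-- positions = [(-1, -1), (-1, 0), (-1, 1),
--              (0, -1),           (0, 1),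
--              (1, -1),  (1, 0),  (1, 1)]
--
-- def repeat_until_no_moves(grid):
--     at = {(i, j) for i, row in enumerate(grid) for j, c in enumerate(row) if c == "@"}
--     total = len(at)
--     while True:
--         keep = {p for p in at
--                 if sum(((p[0] + di, p[1] + dj) in at) for di, dj in positions) >= 4}
--         if len(keep) == len(at):
--             return total - len(keep)
--         at = keep
-- ===== Notes on version B (the rewrite author's own statement) =====
-- stated objective: alternative
-- what changed: Replaces A's repeated sequential in-place grid passes (mutating cells mid-scan) by a set-of-positions computation that synchronously shrinks the '@' set to its greatest '>=4 neighbours' fixpoint and returns initial minus final size; per round it touches only surviving '@' cells instead of rescanning the whole grid.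
import Mathlib
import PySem

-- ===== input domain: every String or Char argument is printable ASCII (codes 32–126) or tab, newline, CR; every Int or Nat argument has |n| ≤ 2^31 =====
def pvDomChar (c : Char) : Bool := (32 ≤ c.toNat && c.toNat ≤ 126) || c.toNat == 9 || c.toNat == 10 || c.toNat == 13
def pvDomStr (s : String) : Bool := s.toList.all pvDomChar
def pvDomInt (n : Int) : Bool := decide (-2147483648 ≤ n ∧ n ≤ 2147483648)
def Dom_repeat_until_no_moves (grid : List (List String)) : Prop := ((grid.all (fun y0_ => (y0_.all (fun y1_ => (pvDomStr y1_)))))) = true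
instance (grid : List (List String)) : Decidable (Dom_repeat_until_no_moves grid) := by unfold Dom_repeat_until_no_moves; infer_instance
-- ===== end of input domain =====

-- B replaces A's repeated sequential in-place grid passes by a synchronous shrink of the
-- '@'-position set to its "≥ 4 neighbours" greatest fixpoint; A mutates `grid` in place and
-- B does not, so the equivalence proved here is about the return value only.

-- ===== PORT A =====

def pvOffsets : List (Int × Int) :=
  [(-1,-1),(-1,0),(-1,1),(0,-1),(0,1),(1,-1),(1,0),(1,1)]

-- read grid[i][j]; "" marks an index Python would raise on (A only reads under its own
-- bound check, where this is exact; Pre_ excludes the reads that would raise)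
def pvRead (g : List (List String)) (i j : Int) : String :=
  if 0 ≤ i ∧ 0 ≤ j then (g.getD i.toNat []).getD j.toNat "" else ""

-- the neighbour count A computes at a visited cell (i, j) (the inner `for pos` loop)
def pvCountA (g : List (List String)) (i j : Nat) : Int :=
  pvOffsets.foldl (fun c o =>
    if 0 ≤ (i : Int) + o.1 ∧ (i : Int) + o.1 < (g.length : Int) ∧
       0 ≤ (j : Int) + o.2 ∧ (j : Int) + o.2 < ((g.getD i []).length : Int) then
      (if pvRead g ((i : Int) + o.1) ((j : Int) + o.2) = "@" then c + 1 else c)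
    else c) 0

-- one iteration of A's inner `for j` body, threading (grid, movable_count)
def pvRowStep (i : Nat) (st : List (List String) × Int) (j : Nat) :
    List (List String) × Int :=
  if pvRead st.1 (i : Int) (j : Int) = "@" then
    if pvCountA st.1 i j < 4 then
      (st.1.set i ((st.1.getD i []).set j "."), st.2 + 1)
    else st
  else st

-- process_lines: returns (mutated grid, movable_count)
def pvPass (g : List (List String)) : List (List String) × Int :=
  (List.range g.length).foldl
    (fun st i => (List.range ((st.1.getD i []).length)).foldl (pvRowStep i) st)
    (g, 0)

-- number of "@" cells; used only to bound the `while True` loop (each non-final pass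
-- removes at least one "@", so pvAtCount grid + 1 passes always reach the break)
def pvAtCount (g : List (List String)) : Nat :=
  (g.map (fun r => r.countP (· == "@"))).sum

def pvLoopA : Nat → List (List String) → Int → Int
  | 0, _, t => t
  | f + 1, g, t =>
      let p := pvPass g
      if p.2 = 0 then t else pvLoopA f p.1 (t + p.2)

def repeat_until_no_moves (grid : List (List String)) : Int :=
  pvLoopA (pvAtCount grid + 1) grid 0

-- ===== PORT B =====

-- Source B's own `positions` constant
def pvOffsetsB : List (Int × Int) :=
  [(-1,-1),(-1,0),(-1,1),(0,-1),(0,1),(1,-1),(1,0),(1,1)]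

def pvNbrs (p : Int × Int) : List (Int × Int) :=
  pvOffsetsB.map (fun o => (p.1 + o.1, p.2 + o.2))

-- the initial set {(i, j) | grid[i][j] == "@"} (row-major, so distinct by construction)
def pvAt0 (g : List (List String)) : List (Int × Int) :=
  (PySem.List.enumerate g 0).flatMap (fun ir =>
    (PySem.List.enumerate ir.2 0).filterMap (fun jc =>
      if jc.2 = "@" then some (ir.1, jc.1) else none))

-- {p ∈ at | #(neighbours of p in at) ≥ 4}
def pvKeep (S : List (Int × Int)) : List (Int × Int) :=
  S.filter (fun p => 4 ≤ (pvNbrs p).countP (fun q => decide (q ∈ S)))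

def pvLoopB : Nat → List (Int × Int) → List (Int × Int)
  | 0, S => S
  | f + 1, S =>
      let K := pvKeep S
      if K.length = S.length then S else pvLoopB f K

def repeat_until_no_moves_alt (grid : List (List String)) : Int :=
  let S := pvAt0 grid
  (S.length : Int) - ((pvLoopB (S.length + 1) S).length : Int)

-- ===== PRECONDITION & SPEC =====

-- Pre_ is exactly the inputs where Python A returns: A raises IndexError iff some '@' cell
-- of the (ragged) grid passes A's bound check (which uses the cell's OWN row length) for a
-- neighbour row that is shorter; every '@' cell is examined in the first pass, so this
-- closed-form condition on the initial grid is exact.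
def Pre_repeat_until_no_moves (grid : List (List String)) : Prop :=
  ∀ i ∈ List.range grid.length, ∀ j ∈ List.range ((grid.getD i []).length),
    (grid.getD i []).getD j "" = "@" →
    ∀ o ∈ pvOffsets,
      (0 ≤ (i : Int) + o.1 ∧ (i : Int) + o.1 < (grid.length : Int) ∧
       0 ≤ (j : Int) + o.2 ∧ (j : Int) + o.2 < ((grid.getD i []).length : Int)) →
      (j : Int) + o.2 < ((grid.getD ((i : Int) + o.1).toNat []).length : Int)

instance (grid : List (List String)) : Decidable (Pre_repeat_until_no_moves grid) := by
  unfold Pre_repeat_until_no_moves; infer_instance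

def pvWitness_repeat_until_no_moves : List (List String) := [["@", "@"], ["@", "@"]]

def Spec_repeat_until_no_moves (grid : List (List String)) (out : Int) : Prop :=
  out = repeat_until_no_moves_alt grid
instance (grid : List (List String)) (out : Int) :
    Decidable (Spec_repeat_until_no_moves grid out) := by
  unfold Spec_repeat_until_no_moves; infer_instance

-- ===== CLAIM (what is proved, stated in full; the proofs are below) =====
def Claim_equal_repeat_until_no_moves : Prop :=
  ∀ (grid : List (List String)), Dom_repeat_until_no_moves grid →
    Pre_repeat_until_no_moves grid →
    Spec_repeat_until_no_moves grid (repeat_until_no_moves grid)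

-- ===== LEMMAS AND PROOFS =====

-- membership of a position in the '@' set of a grid
def pvMem (g : List (List String)) (p : Int × Int) : Prop := pvRead g p.1 p.2 = "@"

-- neighbour degree of p inside the position list S (B's predicate)
def pvDeg (S : List (Int × Int)) (p : Int × Int) : Nat :=
  (pvNbrs p).countP (fun q => decide (q ∈ S))

def pvClosed (S : List (Int × Int)) : Prop := ∀ p ∈ S, 4 ≤ pvDeg S p

-- the loop invariant of A's run: same shape as g0, '@' cells a subset of g0's
def pvInv (g0 g : List (List String)) : Prop :=
  g.length = g0.length ∧ (∀ k : Nat, (g.getD k []).length = (g0.getD k []).length) ∧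
  (∀ p, pvMem g p → pvMem g0 p)

theorem pvGetD_set (l : List (List String)) (i' k : Nat) (x : List String)
    (hlt : i' < l.length) :
    (l.set i' x).getD k [] = if i' = k then x else l.getD k [] := by
  rw [List.getD_eq_getElem?_getD, List.getD_eq_getElem?_getD, List.getElem?_set]
  split_ifs with h1 <;> simp

theorem pvMem_bounds (g : List (List String)) (p : Int × Int) (h : pvMem g p) :
    0 ≤ p.1 ∧ p.1.toNat < g.length ∧ 0 ≤ p.2 ∧
    p.2.toNat < (g.getD p.1.toNat []).length ∧
    (g.getD p.1.toNat []).getD p.2.toNat "" = "@" := by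
  unfold pvMem pvRead at h
  split_ifs at h with h0
  · obtain ⟨h1, h2⟩ := h0
    have hi : p.1.toNat < g.length := by
      by_contra hcon
      rw [List.getD_eq_default _ _ (Nat.le_of_not_lt hcon)] at h
      simp at h
    have hj : p.2.toNat < (g.getD p.1.toNat []).length := by
      by_contra hcon
      rw [List.getD_eq_default _ _ (Nat.le_of_not_lt hcon)] at h
      exact absurd h (by decide)
    exact ⟨h1, hi, h2, hj, h⟩
  · exact absurd h (by decide)

theorem pvRead_eq (g : List (List String)) (i j : Nat) :
    pvRead g (i : Int) (j : Int) = (g.getD i []).getD j "" := by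
  unfold pvRead
  rw [if_pos ⟨Int.natCast_nonneg i, Int.natCast_nonneg j⟩, Int.toNat_natCast,
    Int.toNat_natCast]

-- reading after A removed cell (i, j)
theorem pvRead_set (g : List (List String)) (i j : Nat)
    (hi : i < g.length) (hj : j < (g.getD i []).length) (a b : Int) :
    pvRead (g.set i ((g.getD i []).set j ".")) a b =
      if a = (i : Int) ∧ b = (j : Int) then "." else pvRead g a b := by
  have hrd : ∀ (r : List String) (j' k : Nat) (x : String), j' < r.length →
      (r.set j' x).getD k "" = if j' = k then x else r.getD k "" := by
    intro r j' k x hlt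
    rw [List.getD_eq_getElem?_getD, List.getD_eq_getElem?_getD, List.getElem?_set]
    split_ifs with h1 <;> simp
  unfold pvRead
  by_cases hab : 0 ≤ a ∧ 0 ≤ b
  · rw [if_pos hab, if_pos hab, pvGetD_set _ _ _ _ hi]
    by_cases hai : i = a.toNat
    · rw [if_pos hai, hrd _ _ _ _ hj]
      by_cases hbj : j = b.toNat
      · rw [if_pos hbj, if_pos (by omega)]
      · rw [if_neg hbj, if_neg (by omega), ← hai]
    · rw [if_neg hai, if_neg (by omega)]
  · rw [if_neg hab, if_neg hab, if_neg (by omega)]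

theorem foldl_preserve {α β : Type} (P : β → Prop) (f : β → α → β) (l : List α) (s : β)
    (h0 : P s) (hstep : ∀ b a, a ∈ l → P b → P (f b a)) : P (l.foldl f s) := by
  induction l generalizing s with
  | nil => exact h0
  | cons x xs ih =>
      exact ih (f s x) (hstep s x (List.mem_cons_self ..) h0)
        (fun b a ha hb => hstep b a (List.mem_cons_of_mem _ ha) hb)

theorem pvCountA_eq (g : List (List String)) (i j : Nat) :
    pvCountA g i j = (pvOffsets.countP (fun o =>
      decide ((0 ≤ (i : Int) + o.1 ∧ (i : Int) + o.1 < (g.length : Int) ∧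
        0 ≤ (j : Int) + o.2 ∧ (j : Int) + o.2 < ((g.getD i []).length : Int)) ∧
        pvRead g ((i : Int) + o.1) ((j : Int) + o.2) = "@")) : Int) := by
  have aux : ∀ (l : List (Int × Int)) (c : Int) (P Q : Int × Int → Prop)
      (_ : DecidablePred P) (_ : DecidablePred Q),
      l.foldl (fun c o => if P o then (if Q o then c + 1 else c) else c) c =
        c + (l.countP (fun o => decide (P o ∧ Q o)) : Int) := by
    intro l
    induction l with
    | nil => intro c P Q _ _; simp
    | cons x xs ih =>
        intro c P Q iP iQ
        rw [List.foldl_cons, List.countP_cons, ih _ P Q iP iQ]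
        by_cases h1 : P x <;> by_cases h2 : Q x <;> simp [h1, h2] <;> ring
  unfold pvCountA
  exact (aux pvOffsets 0
    (fun o => (0 ≤ (i : Int) + o.1 ∧ (i : Int) + o.1 < (g.length : Int) ∧
      0 ≤ (j : Int) + o.2 ∧ (j : Int) + o.2 < ((g.getD i []).length : Int)))
    (fun o => pvRead g ((i : Int) + o.1) ((j : Int) + o.2) = "@")
    inferInstance inferInstance).trans (zero_add _)

theorem pvMem_pvAt0 (g : List (List String)) (p : Int × Int) :
    p ∈ pvAt0 g ↔ pvMem g p := by
  unfold pvAt0 pvMem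
  simp only [List.mem_flatMap, List.mem_filterMap, PySem.List.mem_enumerate_iff]
  constructor
  · rintro ⟨ir, ⟨k, hk, rfl⟩, jc, ⟨k2, hk2, rfl⟩, hsome⟩
    simp only [zero_add] at hsome ⊢
    by_cases hat : g[k][k2] = "@"
    · rw [if_pos hat] at hsome
      obtain rfl : ((k : Int), (k2 : Int)) = p := by
        simpa using hsome
      have h1 : k < g.length := by simpa using hk
      have h2 : k2 < g[k].length := by simpa using hk2
      rw [pvRead_eq]
      rw [List.getD_eq_getElem (l := g) _ h1]
      rw [List.getD_eq_getElem _ _ h2]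
      exact hat
    · rw [if_neg hat] at hsome; exact absurd hsome (by simp)
  · intro h
    obtain ⟨h1, hi, h2, hj, hat⟩ := pvMem_bounds g p h
    refine ⟨(p.1, g.getD p.1.toNat []), ⟨p.1.toNat, hi, ?_⟩,
      (p.2, (g.getD p.1.toNat []).getD p.2.toNat ""), ⟨p.2.toNat, hj, ?_⟩, ?_⟩
    · rw [Prod.mk.injEq]
      exact ⟨by omega, (List.getD_eq_getElem _ _ hi)⟩
    · rw [Prod.mk.injEq]
      exact ⟨by omega, (List.getD_eq_getElem _ _ hj)⟩
    · simp only [if_pos hat]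

theorem pvBlock_fst_snd (r : List String) (s t : Int) (q : Int × Int)
    (h : q ∈ (PySem.List.enumerate r t).filterMap (fun jc =>
      if jc.2 = "@" then some (s, jc.1) else none)) : q.1 = s ∧ t ≤ q.2 := by
  obtain ⟨jc, hjc, hf⟩ := List.mem_filterMap.mp h
  obtain ⟨k, hk, rfl⟩ := (PySem.List.mem_enumerate_iff ..).mp hjc
  by_cases hc : r[k] = "@"
  · rw [if_pos hc] at hf
    obtain rfl : (s, t + (k : Int)) = q := by simpa using hf
    exact ⟨rfl, by omega⟩
  · rw [if_neg hc] at hf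
    exact absurd hf (by simp)

theorem pvBlock_nodup (r : List String) (s : Int) : ∀ t : Int,
    ((PySem.List.enumerate r t).filterMap (fun jc =>
      if jc.2 = "@" then some (s, jc.1) else none)).Nodup := by
  induction r with
  | nil => intro t; simp [PySem.List.enumerate]
  | cons c r ih =>
      intro t
      rw [PySem.List.enumerate_cons, List.filterMap_cons]
      by_cases hc : c = "@"
      · simp only [if_pos hc]
        refine List.Nodup.cons ?_ (ih (t + 1))
        intro hmem
        have := (pvBlock_fst_snd r s (t + 1) _ hmem).2
        simp at this
      · simp only [if_neg hc]
        exact ih (t + 1)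

theorem pvAt0_fst (g : List (List String)) (s : Int) (q : Int × Int)
    (h : q ∈ (PySem.List.enumerate g s).flatMap (fun ir =>
      (PySem.List.enumerate ir.2 0).filterMap (fun jc =>
        if jc.2 = "@" then some (ir.1, jc.1) else none))) : s ≤ q.1 := by
  obtain ⟨ir, hir, hq⟩ := List.mem_flatMap.mp h
  obtain ⟨k, hk, rfl⟩ := (PySem.List.mem_enumerate_iff ..).mp hir
  have := (pvBlock_fst_snd _ _ _ _ hq).1
  omega

theorem pvNodup_aux (g : List (List String)) : ∀ s : Int,
    ((PySem.List.enumerate g s).flatMap (fun ir =>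
      (PySem.List.enumerate ir.2 0).filterMap (fun jc =>
        if jc.2 = "@" then some (ir.1, jc.1) else none))).Nodup := by
  induction g with
  | nil => intro s; simp [PySem.List.enumerate]
  | cons r g ih =>
      intro s
      rw [PySem.List.enumerate_cons, List.flatMap_cons]
      rw [List.nodup_append]
      refine ⟨pvBlock_nodup r s 0, ih (s + 1), ?_⟩
      intro x hx y hy heq
      subst heq
      have h1 := (pvBlock_fst_snd r s 0 x hx).1
      have h2 := pvAt0_fst g (s + 1) x hy
      omega

theorem pvNodup_pvAt0 (g : List (List String)) : (pvAt0 g).Nodup :=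
  pvNodup_aux g 0

theorem pvBlock_length (r : List String) (s : Int) : ∀ t : Int,
    ((PySem.List.enumerate r t).filterMap (fun jc =>
      if jc.2 = "@" then some (s, jc.1) else none)).length = r.countP (· == "@") := by
  induction r with
  | nil => intro t; simp [PySem.List.enumerate]
  | cons c r ih =>
      intro t
      rw [PySem.List.enumerate_cons, List.filterMap_cons, List.countP_cons]
      by_cases hc : c = "@"
      · subst hc
        simp [ih (t + 1)]
      · simp only [if_neg hc, ih (t + 1)]
        have : (c == "@") = false := by simpa using hc
        simp [this]

theorem pvAtCount_eq_length (g : List (List String)) :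
    pvAtCount g = (pvAt0 g).length := by
  unfold pvAtCount pvAt0
  rw [List.length_flatMap]
  congr 1
  have h1 : ∀ ir ∈ PySem.List.enumerate g 0,
      ((PySem.List.enumerate ir.2 0).filterMap (fun jc =>
        if jc.2 = "@" then some (ir.1, jc.1) else none)).length
        = ir.2.countP (· == "@") := fun ir _ => pvBlock_length ir.2 ir.1 0
  rw [List.map_congr_left h1]
  have : (PySem.List.enumerate g 0).map (fun ir => ir.2.countP (· == "@"))
      = ((PySem.List.enumerate g 0).map (·.2)).map (fun r => r.countP (· == "@")) := by
    rw [List.map_map]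
    rfl
  rw [this, PySem.List.map_snd_enumerate]

-- degree inside T is at most A's computed count (needs Pre_: bound checks pass)
theorem pvDeg_le_countA (g0 g : List (List String)) (T : List (Int × Int))
    (hpre : Pre_repeat_until_no_moves g0) (hinv : pvInv g0 g)
    (hT : ∀ p ∈ T, pvMem g p) (i j : Nat)
    (hi : i < g.length) (hj : j < (g.getD i []).length) :
    (pvDeg T ((i : Int), (j : Int)) : Int) ≤ pvCountA g i j := by
  rw [pvCountA_eq]
  unfold pvDeg pvNbrs
  rw [List.countP_map]
  have hmono := List.countP_mono_left (l := pvOffsets)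
    (p := fun o => decide ((((i : Int) + o.1, (j : Int) + o.2) : Int × Int) ∈ T))
    (q := fun o => decide ((0 ≤ (i : Int) + o.1 ∧ (i : Int) + o.1 < (g.length : Int) ∧
        0 ≤ (j : Int) + o.2 ∧ (j : Int) + o.2 < ((g.getD i []).length : Int)) ∧
        pvRead g ((i : Int) + o.1) ((j : Int) + o.2) = "@"))
    (by
      intro o ho hoT
      simp only [decide_eq_true_eq] at hoT ⊢
      have hqm : pvMem g ((i : Int) + o.1, (j : Int) + o.2) := hT _ hoT
      obtain ⟨hb1, hb2, hb3, hb4, hb5⟩ := pvMem_bounds g _ hqm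
      dsimp only at hb1 hb2 hb3 hb4 hb5
      obtain ⟨hinv1, hinv2, hinv3⟩ := hinv
      have hq0 : pvMem g0 ((i : Int) + o.1, (j : Int) + o.2) := hinv3 _ hqm
      obtain ⟨hc1, hc2, hc3, hc4, hc5⟩ := pvMem_bounds g0 _ hq0
      dsimp only at hc1 hc2 hc3 hc4 hc5
      refine ⟨⟨hb1, by omega, hb3, ?_⟩, hqm⟩
      by_cases ho1 : o.1 = 0
      · have hq1 : ((i : Int) + o.1).toNat = i := by omega
        rw [hq1] at hb4
        omega
      · have ho8 : o.1 = -1 ∨ o.1 = 0 ∨ o.1 = 1 := by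
          fin_cases ho <;> simp
        have homem : (-o.1, (0 : Int)) ∈ pvOffsets := by
          rcases ho8 with h | h | h
          · rw [h]; decide
          · exact absurd h ho1
          · rw [h]; decide
        have hpre' := hpre ((i : Int) + o.1).toNat
          (List.mem_range.mpr hc2)
          ((j : Int) + o.2).toNat (List.mem_range.mpr hc4) hc5 (-o.1, 0) homem
        dsimp only at hpre'
        have hprem : 0 ≤ ((((i : Int) + o.1).toNat : Int) + -o.1) ∧
            ((((i : Int) + o.1).toNat : Int) + -o.1) < (g0.length : Int) ∧
            0 ≤ ((((j : Int) + o.2).toNat : Int) + 0) ∧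
            ((((j : Int) + o.2).toNat : Int) + 0) < ((g0.getD ((i : Int) + o.1).toNat []).length : Int) := by
          refine ⟨by omega, by omega, by omega, by omega⟩
        have hconc := hpre' hprem
        have hidx : ((((i : Int) + o.1).toNat : Int) + -o.1).toNat = i := by omega
        rw [hidx] at hconc
        have hlen := hinv2 i
        omega)
  exact_mod_cast hmono

-- A's computed count is at most the degree inside the full '@' set of g
theorem pvCountA_le_deg (g : List (List String)) (i j : Nat) :
    pvCountA g i j ≤ (pvDeg (pvAt0 g) ((i : Int), (j : Int)) : Int) := by
  rw [pvCountA_eq]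
  unfold pvDeg pvNbrs
  rw [List.countP_map]
  have := List.countP_mono_left (l := pvOffsets)
    (p := fun o => decide ((0 ≤ (i : Int) + o.1 ∧ (i : Int) + o.1 < (g.length : Int) ∧
        0 ≤ (j : Int) + o.2 ∧ (j : Int) + o.2 < ((g.getD i []).length : Int)) ∧
        pvRead g ((i : Int) + o.1) ((j : Int) + o.2) = "@"))
    (q := fun o => decide (((i : Int) + o.1, (j : Int) + o.2) ∈ pvAt0 g))
    (by intro o _ ho
        simp only [decide_eq_true_eq] at ho ⊢
        exact (pvMem_pvAt0 g _).mpr ho.2)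
  exact_mod_cast this




-- one pass preserves the invariant and keeps every closed subset intact
theorem pvRowStep_preserve (g0 : List (List String)) (T : List (Int × Int))
    (hpre : Pre_repeat_until_no_moves g0) (hcl : pvClosed T) (i : Nat)
    (st : List (List String) × Int) (j : Nat)
    (h : pvInv g0 st.1 ∧ ∀ p ∈ T, pvMem st.1 p) :
    pvInv g0 (pvRowStep i st j).1 ∧ ∀ p ∈ T, pvMem (pvRowStep i st j).1 p := by
  unfold pvRowStep
  split_ifs with hread hcnt
  case neg => exact h
  case neg => exact h
  -- removal branch
  have hmem : pvMem st.1 ((i : Int), (j : Int)) := hread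
  obtain ⟨_, hb2, _, hb4, _⟩ := pvMem_bounds st.1 _ hmem
  dsimp only at hb2 hb4
  rw [Int.toNat_natCast] at hb2 hb4
  have hnotT : ((i : Int), (j : Int)) ∉ T := by
    intro hpT
    have h1 := hcl _ hpT
    have h2 := pvDeg_le_countA g0 st.1 T hpre h.1 h.2 i j hb2 hb4
    omega
  obtain ⟨hinv1, hinv2, hinv3⟩ := h.1
  refine ⟨⟨?_, ?_, ?_⟩, ?_⟩
  · simpa using hinv1
  · intro k
    dsimp only
    rw [pvGetD_set _ _ _ _ hb2]
    split_ifs with hk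
    · rw [← hk, List.length_set]
      exact hinv2 i
    · exact hinv2 k
  · intro p hp
    unfold pvMem at hp ⊢
    dsimp only at hp
    rw [pvRead_set _ _ _ hb2 hb4] at hp
    split_ifs at hp with hij
    · exact absurd hp (by decide)
    · exact hinv3 p hp
  · intro p hpT
    unfold pvMem
    dsimp only
    rw [pvRead_set _ _ _ hb2 hb4]
    rw [if_neg ?_]
    · exact h.2 p hpT
    · intro hij
      apply hnotT
      have : p = ((i : Int), (j : Int)) := Prod.ext hij.1 hij.2
      rwa [this] at hpT

theorem pvPass_preserve (g0 : List (List String)) (T : List (Int × Int))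
    (hpre : Pre_repeat_until_no_moves g0) (hcl : pvClosed T)
    (g : List (List String)) (h : pvInv g0 g ∧ ∀ p ∈ T, pvMem g p) :
    pvInv g0 (pvPass g).1 ∧ ∀ p ∈ T, pvMem (pvPass g).1 p := by
  unfold pvPass
  exact foldl_preserve
    (fun (st : List (List String) × Int) => pvInv g0 st.1 ∧ ∀ p ∈ T, pvMem st.1 p) _ _ _ h
    (fun b a _ hb => foldl_preserve
      (fun (st : List (List String) × Int) => pvInv g0 st.1 ∧ ∀ p ∈ T, pvMem st.1 p) _ _ _ hb
      (fun b' a' _ hb' => pvRowStep_preserve g0 T hpre hcl a b' a' hb'))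

theorem foldl_le {α β : Type} (f : β → α → β) (m : β → Int)
    (hstep : ∀ b a, m b ≤ m (f b a)) (l : List α) (s : β) :
    m s ≤ m (l.foldl f s) := by
  induction l generalizing s with
  | nil => exact le_refl _
  | cons x xs ih => exact le_trans (hstep s x) (ih (f s x))

theorem pvRowStep_m_le (i : Nat) (st : List (List String) × Int) (j : Nat) :
    st.2 ≤ (pvRowStep i st j).2 := by
  unfold pvRowStep
  split_ifs <;> simp

theorem pvInner_m_le (i : Nat) (js : List Nat) (st : List (List String) × Int) :
    st.2 ≤ (js.foldl (pvRowStep i) st).2 :=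
  foldl_le _ (·.2) (fun b a => pvRowStep_m_le i b a) js st

theorem pvOuter_m_le (is : List Nat) (st : List (List String) × Int) :
    st.2 ≤ (is.foldl (fun st i =>
      (List.range ((st.1.getD i []).length)).foldl (pvRowStep i) st) st).2 :=
  foldl_le _ (·.2) (fun b a => pvInner_m_le a _ b) is st

-- the counter never decreases
theorem pvPass_m_nonneg (g : List (List String)) : 0 ≤ (pvPass g).2 :=
  pvOuter_m_le (List.range g.length) (g, 0)

-- bookkeeping: the counter counts removed '@' cells exactly
theorem pvCountP_set_at (r : List String) : ∀ (j : Nat), j < r.length →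
    r.getD j "" = "@" →
    (r.set j ".").countP (· == "@") + 1 = r.countP (· == "@") := by
  induction r with
  | nil => intro j hj _; simp at hj
  | cons c t ih =>
      intro j hj hat
      cases j with
      | zero =>
          simp only [List.getD_cons_zero] at hat
          subst hat
          simp
      | succ j =>
          simp only [List.getD_cons_succ] at hat
          simp only [List.set_cons_succ, List.countP_cons]
          have := ih j (by simpa using hj) hat
          omega

theorem pvSum_set_nat (ns : List Nat) : ∀ (i : Nat) (y : Nat), i < ns.length →
    (ns.set i y).sum + ns.getD i 0 = ns.sum + y := by
  induction ns with
  | nil => intro i y hi; simp at hi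
  | cons n t ih =>
      intro i y hi
      cases i with
      | zero => simp; omega
      | succ i =>
          simp only [List.set_cons_succ, List.sum_cons, List.getD_cons_succ]
          have := ih i y (by simpa using hi)
          omega

theorem pvAtCount_set (g : List (List String)) (i j : Nat)
    (hi : i < g.length) (hj : j < (g.getD i []).length)
    (hat : (g.getD i []).getD j "" = "@") :
    pvAtCount (g.set i ((g.getD i []).set j ".")) + 1 = pvAtCount g := by
  unfold pvAtCount
  rw [List.map_set]
  have hlen : i < (g.map (fun r => r.countP (· == "@"))).length := by simpa using hi
  have hsum := pvSum_set_nat (g.map (fun r => r.countP (· == "@"))) i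
    (((g.getD i []).set j ".").countP (· == "@")) hlen
  have hgd : (g.map (fun r => r.countP (· == "@"))).getD i 0
      = (g.getD i []).countP (· == "@") := by
    rw [List.getD_eq_getElem _ _ hlen, List.getElem_map,
      List.getD_eq_getElem _ _ hi]
  rw [hgd] at hsum
  have hcp := pvCountP_set_at (g.getD i []) j hj hat
  omega

theorem pvRowStep_count (i : Nat) (st : List (List String) × Int) (j : Nat) :
    (pvAtCount (pvRowStep i st j).1 : Int) + (pvRowStep i st j).2
      = (pvAtCount st.1 : Int) + st.2 := by
  unfold pvRowStep
  split_ifs with hread hcnt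
  case neg => rfl
  case neg => rfl
  have hmem : pvMem st.1 ((i : Int), (j : Int)) := hread
  obtain ⟨_, hb2, _, hb4, hb5⟩ := pvMem_bounds st.1 _ hmem
  dsimp only at hb2 hb4 hb5
  rw [Int.toNat_natCast] at hb2 hb4 hb5
  have := pvAtCount_set st.1 i j hb2 hb4 hb5
  dsimp only
  omega

theorem pvPass_count (g : List (List String)) :
    (pvAtCount (pvPass g).1 : Int) + (pvPass g).2 = (pvAtCount g : Int) := by
  unfold pvPass
  have h := foldl_preserve
    (fun (st : List (List String) × Int) =>
      (pvAtCount st.1 : Int) + st.2 = (pvAtCount g : Int))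
    _ (List.range g.length) (g, 0) (by simp)
    (fun b a _ hb => by
      have h2 := foldl_preserve
        (fun (st : List (List String) × Int) =>
          (pvAtCount st.1 : Int) + st.2 = (pvAtCount g : Int))
        (pvRowStep a) (List.range ((b.1.getD a []).length)) b hb
        (fun b' a' _ hb' => by dsimp only; rw [pvRowStep_count]; exact hb')
      exact h2)
  exact h

-- a pass that removes nothing leaves the grid intact, and then every '@' cell has degree ≥ 4
theorem pvInner_fix (i : Nat) (js : List Nat) :
    ∀ (st : List (List String) × Int),
      (js.foldl (pvRowStep i) st).2 = st.2 →
      js.foldl (pvRowStep i) st = st ∧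
        ∀ j ∈ js, pvRead st.1 (i : Int) (j : Int) = "@" → 4 ≤ pvCountA st.1 i j := by
  induction js with
  | nil => intro st _; exact ⟨rfl, by simp⟩
  | cons j js ih =>
      intro st h
      rw [List.foldl_cons] at h
      have h1 := pvRowStep_m_le i st j
      have h2 := pvInner_m_le i js (pvRowStep i st j)
      have heq : (pvRowStep i st j).2 = st.2 := by omega
      have hstep : pvRowStep i st j = st := by
        unfold pvRowStep at heq ⊢
        split_ifs at heq ⊢ with hread hcnt
        · exact absurd (heq : st.2 + 1 = st.2) (by omega)
        · rfl
        · rfl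
      rw [hstep] at h
      obtain ⟨ha, hb⟩ := ih st h
      refine ⟨by rw [List.foldl_cons, hstep, ha], ?_⟩
      intro j' hj' hread'
      rcases List.mem_cons.mp hj' with rfl | hj'
      · by_contra hlt
        push Not at hlt
        unfold pvRowStep at hstep
        rw [if_pos hread', if_pos (by omega)] at hstep
        have := congrArg Prod.snd hstep
        dsimp only at this
        omega
      · exact hb j' hj' hread'

theorem pvOuter_fix (is : List Nat) :
    ∀ (st : List (List String) × Int),
      (is.foldl (fun st i =>
        (List.range ((st.1.getD i []).length)).foldl (pvRowStep i) st) st).2 = st.2 →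
      is.foldl (fun st i =>
        (List.range ((st.1.getD i []).length)).foldl (pvRowStep i) st) st = st ∧
        ∀ i ∈ is, ∀ j ∈ List.range ((st.1.getD i []).length),
          pvRead st.1 (i : Int) (j : Int) = "@" → 4 ≤ pvCountA st.1 i j := by
  induction is with
  | nil => intro st _; exact ⟨rfl, by simp⟩
  | cons i is ih =>
      intro st h
      rw [List.foldl_cons] at h
      have h1 := pvInner_m_le i (List.range ((st.1.getD i []).length)) st
      have h2 := pvOuter_m_le is ((List.range ((st.1.getD i []).length)).foldl (pvRowStep i) st)
      have heq : ((List.range ((st.1.getD i []).length)).foldl (pvRowStep i) st).2 = st.2 := by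
        omega
      obtain ⟨ha, hb⟩ := pvInner_fix i (List.range ((st.1.getD i []).length)) st heq
      rw [ha] at h
      obtain ⟨hc, hd⟩ := ih st h
      refine ⟨by rw [List.foldl_cons, ha, hc], ?_⟩
      intro i' hi'
      rcases List.mem_cons.mp hi' with rfl | hi'
      · exact hb
      · exact hd i' hi'

theorem pvPass_fix (g : List (List String)) (h : (pvPass g).2 = 0) :
    (pvPass g).1 = g ∧ ∀ p, pvMem g p → 4 ≤ pvCountA g p.1.toNat p.2.toNat := by
  unfold pvPass at h ⊢
  obtain ⟨ha, hb⟩ := pvOuter_fix (List.range g.length) (g, 0) h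
  refine ⟨by rw [ha], ?_⟩
  intro p hp
  obtain ⟨h1, h2, h3, h4, h5⟩ := pvMem_bounds g p hp
  have hread : pvRead g (p.1.toNat : Int) (p.2.toNat : Int) = "@" := by
    rw [pvRead_eq]; exact h5
  exact hb p.1.toNat (List.mem_range.mpr h2) p.2.toNat (List.mem_range.mpr h4) hread

theorem pvLoopA_master (g0 : List (List String)) (T : List (Int × Int))
    (hpre : Pre_repeat_until_no_moves g0) (hcl : pvClosed T) :
    ∀ (fuel : Nat) (g : List (List String)) (t : Int),
      pvAtCount g < fuel → pvInv g0 g → (∀ p ∈ T, pvMem g p) →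
      ∃ gf, pvLoopA fuel g t = t + ((pvAtCount g : Int) - (pvAtCount gf : Int)) ∧
        pvInv g0 gf ∧ (∀ p ∈ T, pvMem gf p) ∧
        (∀ p, pvMem gf p → 4 ≤ pvCountA gf p.1.toNat p.2.toNat) := by
  intro fuel
  induction fuel with
  | zero => intro g t h; exact absurd h (by omega)
  | succ f ih =>
      intro g t hfuel hinv hT
      rw [pvLoopA]
      by_cases hm : (pvPass g).2 = 0
      · rw [if_pos hm]
        obtain ⟨_, hcl'⟩ := pvPass_fix g hm
        exact ⟨g, by ring_nf, hinv, hT, hcl'⟩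
      · rw [if_neg hm]
        have hcnt := pvPass_count g
        have hnn := pvPass_m_nonneg g
        have hlt : pvAtCount (pvPass g).1 < f := by omega
        obtain ⟨hinv', hT'⟩ := pvPass_preserve g0 T hpre hcl g ⟨hinv, hT⟩
        obtain ⟨gf, hval, hinvf, hTf, hclf⟩ := ih (pvPass g).1 (t + (pvPass g).2) hlt hinv' hT'
        exact ⟨gf, by rw [hval]; omega, hinvf, hTf, hclf⟩

theorem pvLoopB_sublist (f : Nat) (S : List (Int × Int)) :
    List.Sublist (pvLoopB f S) S := by
  induction f generalizing S with
  | zero => exact List.Sublist.refl S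
  | succ f ih =>
      rw [pvLoopB]
      split_ifs with h
      · exact List.Sublist.refl S
      · exact (ih (pvKeep S)).trans List.filter_sublist

theorem pvLoopB_closed (f : Nat) : ∀ (S : List (Int × Int)), S.length < f →
    pvClosed (pvLoopB f S) := by
  induction f with
  | zero => intro S h; exact absurd h (by omega)
  | succ f ih =>
      intro S h
      rw [pvLoopB]
      split_ifs with hk
      · have hsub : (pvKeep S).Sublist S := List.filter_sublist
        have heq : pvKeep S = S := hsub.eq_of_length hk
        intro p hp
        have hp' : p ∈ pvKeep S := by rw [heq]; exact hp
        have := (List.mem_filter.mp hp').2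
        simpa [pvDeg] using this
      · have hsub : (pvKeep S).Sublist S := List.filter_sublist
        have hle := hsub.length_le
        exact ih (pvKeep S) (by omega)


theorem pvLoopB_preserve (T : List (Int × Int)) (hcl : pvClosed T) (f : Nat) :
    ∀ (S : List (Int × Int)), (∀ p ∈ T, p ∈ S) → ∀ p ∈ T, p ∈ pvLoopB f S := by
  induction f with
  | zero => exact fun S hTS => hTS
  | succ f ih =>
      intro S hTS
      rw [pvLoopB]
      split_ifs with h
      · exact hTS
      · refine ih (pvKeep S) ?_
        intro p hpT
        unfold pvKeep
        rw [List.mem_filter]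
        refine ⟨hTS p hpT, ?_⟩
        have h1 := hcl p hpT
        have h2 : pvDeg T p ≤ pvDeg S p := by
          unfold pvDeg
          exact List.countP_mono_left (fun q _ hq => by
            simp only [decide_eq_true_eq] at hq ⊢
            exact hTS q hq)
        simp only [decide_eq_true_eq]
        unfold pvDeg at h1 h2
        omega

-- ===== VERDICT (by name: the statement is the Claim_ definition above) =====
theorem repeat_until_no_moves_spec : Claim_equal_repeat_until_no_moves := by
  intro grid _ hpre
  unfold Spec_repeat_until_no_moves repeat_until_no_moves repeat_until_no_moves_alt
  have hnodup0 : (pvAt0 grid).Nodup := pvNodup_pvAt0 grid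
  have hSfsub : (pvLoopB ((pvAt0 grid).length + 1) (pvAt0 grid)).Sublist (pvAt0 grid) :=
    pvLoopB_sublist _ _
  have hSfclosed : pvClosed (pvLoopB ((pvAt0 grid).length + 1) (pvAt0 grid)) :=
    pvLoopB_closed _ (pvAt0 grid) (by omega)
  have hSfmem0 : ∀ p ∈ pvLoopB ((pvAt0 grid).length + 1) (pvAt0 grid), pvMem grid p :=
    fun p hp => (pvMem_pvAt0 grid p).mp (hSfsub.subset hp)
  have hinv0 : pvInv grid grid := ⟨rfl, fun _ => rfl, fun _ hp => hp⟩
  obtain ⟨gf, hval, hinvf, hTf, hclf⟩ :=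
    pvLoopA_master grid _ hpre hSfclosed (pvAtCount grid + 1) grid 0 (by omega) hinv0 hSfmem0
  rw [hval]
  have hTA_closed : pvClosed (pvAt0 gf) := by
    intro p hp
    have hm : pvMem gf p := (pvMem_pvAt0 gf p).mp hp
    have h4 := hclf p hm
    have hle := pvCountA_le_deg gf p.1.toNat p.2.toNat
    obtain ⟨hb1, _, hb3, _, _⟩ := pvMem_bounds gf p hm
    have hpp : ((p.1.toNat : Int), (p.2.toNat : Int)) = p := Prod.ext (by omega) (by omega)
    rw [hpp] at hle
    omega
  have hTA_sub0 : ∀ p ∈ pvAt0 gf, p ∈ pvAt0 grid := fun p hp =>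
    (pvMem_pvAt0 grid p).mpr (hinvf.2.2 p ((pvMem_pvAt0 gf p).mp hp))
  have hTA_in_Sf : ∀ p ∈ pvAt0 gf, p ∈ pvLoopB ((pvAt0 grid).length + 1) (pvAt0 grid) :=
    pvLoopB_preserve (pvAt0 gf) hTA_closed _ (pvAt0 grid) hTA_sub0
  have hSf_in_TA : ∀ p ∈ pvLoopB ((pvAt0 grid).length + 1) (pvAt0 grid), p ∈ pvAt0 gf :=
    fun p hp => (pvMem_pvAt0 gf p).mpr (hTf p hp)
  have hnodupTA : (pvAt0 gf).Nodup := pvNodup_pvAt0 gf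
  have hnodupSf : (pvLoopB ((pvAt0 grid).length + 1) (pvAt0 grid)).Nodup :=
    hnodup0.sublist hSfsub
  have hlen1 := (List.Nodup.subperm hnodupTA hTA_in_Sf).length_le
  have hlen2 := (List.Nodup.subperm hnodupSf hSf_in_TA).length_le
  have hc1 := pvAtCount_eq_length grid
  have hc2 := pvAtCount_eq_length gf
  show 0 + ((pvAtCount grid : Int) - (pvAtCount gf : Int)) =
    ((pvAt0 grid).length : Int) -
      ((pvLoopB ((pvAt0 grid).length + 1) (pvAt0 grid)).length : Int)
  omega
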